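-- pv_equiv track=rewrite | github.com/UBC-Rocket/UBCRocketGroundStation | GroundProcessing.py | setUpDataSet
-- ===== SOURCE A (Python) =====
-- def setUpDataSet(line):
-- 	dataSet = list()
-- 	l = len(line)
-- 	name=""
-- 	for i in range (0, l-1):
-- 		if line[i] != ',':
-- 			name = name +line[i]
-- 		else:
-- 			newlist = list()
-- 			newlist.append(name)
-- 			dataSet.append(newlist)
-- 			name = ""
-- 	return dataSet
-- ===== SOURCE B (Python) =====
-- def setUpDataSet(line):
-- 	# Simpler: tokenize with str.split instead of a char-by-char loop.
-- 	# A scans line[:-1] and emits a field at each comma, never the trailing field,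
-- 	# so the result is the comma-split of line[:-1] minus its last token.
-- 	return [[tok] for tok in line[:-1].split(',')[:-1]]
-- ===== Notes on version B (the rewrite author's own statement) =====
-- stated objective: simpler
-- what changed: Replaces the character-by-character accumulate-and-detect-comma loop with string tokenization: split line[:-1] on the comma separator and drop the final token, wrapping each remaining token in a one-element list.
import Mathlib
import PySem

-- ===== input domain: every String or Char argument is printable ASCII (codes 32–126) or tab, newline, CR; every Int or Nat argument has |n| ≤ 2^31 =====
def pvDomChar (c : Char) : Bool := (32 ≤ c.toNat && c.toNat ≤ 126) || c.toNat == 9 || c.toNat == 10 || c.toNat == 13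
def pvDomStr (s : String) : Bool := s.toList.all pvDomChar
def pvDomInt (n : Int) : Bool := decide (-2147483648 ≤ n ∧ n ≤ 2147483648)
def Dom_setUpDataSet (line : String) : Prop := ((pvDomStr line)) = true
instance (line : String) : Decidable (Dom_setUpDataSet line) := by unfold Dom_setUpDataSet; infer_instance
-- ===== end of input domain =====

-- B replaces A's char-by-char accumulate-and-detect-comma loop with split-on-comma
-- tokenization followed by one token-level pass (objective: simpler).

-- ===== PORT A =====
-- A's index loop 'for i in range(0, l-1): … line[i] …' visits exactly the first l-1
-- characters in order, ported as a fold over line.toList.dropLast; the growing string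
-- 'name' is kept as a List Char and turned into a String when emitted (exact).
-- one loop iteration of A, on the state (dataSet, name)
def pvStepA (st : List (List String) × List Char) (c : Char) :
    List (List String) × List Char :=
  if c ≠ ',' then (st.1, st.2 ++ [c])
  else (st.1 ++ [[String.ofList st.2]], [])

def setUpDataSet (line : String) : List (List String) :=
  (line.toList.dropLast.foldl pvStepA ([], [])).1

-- ===== PORT B =====
def setUpDataSet_alt (line : String) : List (List String) :=
  let toks := PySem.Chars.splitOn (PySem.List.slice line.toList none (some (-1))) [',']
  (PySem.List.slice toks none (some (-1))).map (fun t => [String.ofList t])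

-- ===== PRECONDITION & SPEC =====
def Spec_setUpDataSet (line : String) (out : List (List String)) : Prop := out = setUpDataSet_alt line
instance (line : String) (out : List (List String)) : Decidable (Spec_setUpDataSet line out) := by unfold Spec_setUpDataSet; infer_instance

-- ===== CLAIM (what is proved, stated in full; the proofs are below) =====
def Claim_equal_setUpDataSet : Prop := ∀ (line : String), Dom_setUpDataSet line → Spec_setUpDataSet line (setUpDataSet line)

-- ===== LEMMAS AND PROOFS =====

-- xs[:-1] is dropLast (both at the character and the token level)
theorem pv_slice_neg_one {α : Type} (xs : List α) :
    PySem.List.slice xs none (some (-1)) = xs.dropLast := by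
  simp [pysem, List.dropLast_eq_take]

-- A's fold only ever appends to the emitted-fields component
theorem pv_foldA_acc (cs : List Char) (ds : List (List String)) (name : List Char) :
    (cs.foldl pvStepA (ds, name)).1
    = ds ++ (cs.foldl pvStepA ([], name)).1 := by
  induction cs generalizing ds name with
  | nil => simp
  | cons c rest ih =>
    rw [List.foldl_cons, List.foldl_cons]
    by_cases hc : c = ','
    · rw [show pvStepA (ds, name) c = (ds ++ [[String.ofList name]], []) from by
            simp [pvStepA, hc],
          show pvStepA (([], name) : List (List String) × List Char) c
              = ([[String.ofList name]], []) from by simp [pvStepA, hc],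
          ih (ds ++ [[String.ofList name]]) [], ih [[String.ofList name]] []]
      simp
    · rw [show pvStepA (ds, name) c = (ds, name ++ [c]) from by simp [pvStepA, hc],
          show pvStepA (([], name) : List (List String) × List Char) c
              = ([], name ++ [c]) from by simp [pvStepA, hc],
          ih ds (name ++ [c])]

-- the split's worker, minus its last (unemitted) token, tracks A's fold exactly
theorem pv_go_foldA (cs : List Char) (fuel : Nat) (cur : List Char)
    (acc : List (List Char)) (h : cs.length ≤ fuel) :
    (PySem.Chars.splitOn.go [','] fuel cs cur acc).dropLast.map (fun t => ([String.ofList t] : List String))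
    = acc.reverse.map (fun t => [String.ofList t])
      ++ (cs.foldl pvStepA ([], cur.reverse)).1 := by
  induction cs generalizing fuel cur acc with
  | nil =>
    cases fuel with
    | zero => simp [PySem.Chars.splitOn.go]
    | succ f => simp [PySem.Chars.splitOn.go]
  | cons c rest ih =>
    cases fuel with
    | zero => simp at h
    | succ f =>
      have hf : rest.length ≤ f := by simpa using h
      by_cases hc : c = ','
      · subst hc
        have hstep : PySem.Chars.splitOn.go [','] (f+1) (','::rest) cur acc
            = PySem.Chars.splitOn.go [','] f rest [] (cur.reverse :: acc) := by
          simp [PySem.Chars.splitOn.go]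
        rw [hstep, ih f [] (cur.reverse :: acc) hf, List.foldl_cons,
            show pvStepA (([], cur.reverse) : List (List String) × List Char) ','
                = ([[String.ofList cur.reverse]], []) from by simp [pvStepA],
            pv_foldA_acc rest [[String.ofList cur.reverse]] []]
        simp
      · have hstep : PySem.Chars.splitOn.go [','] (f+1) (c::rest) cur acc
            = PySem.Chars.splitOn.go [','] f rest (c::cur) acc := by
          simp [PySem.Chars.splitOn.go, List.isPrefixOf]
          intro h'; exact absurd h'.symm hc
        rw [hstep, ih f (c::cur) acc hf, List.foldl_cons,
            show pvStepA (([], cur.reverse) : List (List String) × List Char) c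
                = ([], cur.reverse ++ [c]) from by simp [pvStepA, hc]]
        simp

-- ===== VERDICT (by name: the statement is the Claim_ definition above) =====
theorem setUpDataSet_spec : Claim_equal_setUpDataSet := by
  intro line _
  unfold Spec_setUpDataSet setUpDataSet
  simp only [setUpDataSet_alt, pv_slice_neg_one]
  rw [PySem.Chars.splitOn]
  exact (pv_go_foldA line.toList.dropLast (line.toList.dropLast.length + 1) [] []
    (by omega)).symm
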